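-- pv_equiv track=rewrite | github.com/TAMUsquirrel/ProperSentenceCase | PSC_Converter.py | title_triwise_front_capper
-- ===== SOURCE A (Python) =====
-- from itertools import tee
--
-- List_of_Single_Word_Titles = ['agent', 'brother', 'cantor', 'captain', 'chairperson', 'chancellor', 'chef', 'chief', 'commissioner', 'darth', 'dame', 'dean', 'deputy', 'detective', 'director', 'doctor', 'father', 'governor', 'judge', 'king', 'queen', 'prince', 'princess', 'czar', 'lady', 'laird', 'lieutenant', 'lord', 'madame', 'master', 'miss', 'officer', 'pastor', 'president', 'principal', 'professor', 'provost', 'rabbi', 'rector', 'regent', 'reverend', 'saint', 'sensei', 'sheriff', 'sister', 'student', 'trainer', 'warden']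
--
-- def triwise(iterable):
--     a, b = tee(iterable)
--     a, c = tee(iterable)
--     next(b, None)
--     next(c, None)
--     next(c, None)
--     return zip(a, b, c)
--
-- def title_triwise_front_capper(NLP_Dict, input_text):
--     output_document = ''
--     for sentence in NLP_Dict:
--         for word1, word2, word3 in triwise(sentence):
--             word1_start, word1_end = int(word1['start_char']), int(word1['end_char'])
--             word1_location = input_text[word1_start:word1_end]
--             space_between_word1_word2 = (int(word2['start_char'])-int(word1['end_char']))*' '
--             if word1['text'] in List_of_Single_Word_Titles and word2['text'] in ['of'] and word3['upos'] in ['PROPN', 'NOUN']: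
--                 output_document += word1_location.title()+(space_between_word1_word2)
--             else:
--                 output_document += word1_location+(space_between_word1_word2)
--         else:
--             try:
--                 output_document += input_text[int(sentence[-2]['start_char']):int(sentence[-2]['end_char'])]+((int(sentence[-1]['start_char'])-int(sentence[-2]['end_char']))*' ')
--             except IndexError:
--                 continue
--             try:
--                 output_document += input_text[int(sentence[-1]['start_char']):int(sentence[-1]['end_char'])]+' '
--             except IndexError:
--                 continue
--     else:
--         output_document += ' '
--     return output_document
-- ===== SOURCE B (Python) =====
-- List_of_Single_Word_Titles = ['agent', 'brother', 'cantor', 'captain', 'chairperson', 'chancellor', 'chef', 'chief', 'commissioner', 'darth', 'dame', 'dean', 'deputy', 'detective', 'director', 'doctor', 'father', 'governor', 'judge', 'king', 'queen', 'prince', 'princess', 'czar', 'lady', 'laird', 'lieutenant', 'lord', 'madame', 'master', 'miss', 'officer', 'pastor', 'president', 'principal', 'professor', 'provost', 'rabbi', 'rector', 'regent', 'reverend', 'saint', 'sensei', 'sheriff', 'sister', 'student', 'trainer', 'warden']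
--
-- def _render(sentence, i, n, input_text):
--     w = sentence[i]
--     loc = input_text[int(w['start_char']):int(w['end_char'])]
--     if i + 2 < n and w['text'] in List_of_Single_Word_Titles \
--             and sentence[i + 1]['text'] == 'of' \
--             and sentence[i + 2]['upos'] in ('PROPN', 'NOUN'):
--         loc = loc.title()
--     if i + 1 < n:
--         return loc + (int(sentence[i + 1]['start_char']) - int(w['end_char'])) * ' '
--     return loc + ' '
--
-- def title_triwise_front_capper(NLP_Dict, input_text):
--     pieces = []
--     for sentence in NLP_Dict:
--         n = len(sentence)
--         if n < 2:
--             continue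
--         for i in range(n):
--             pieces.append(_render(sentence, i, n, input_text))
--     return ''.join(pieces) + ' '
-- ===== Notes on version B (the rewrite author's own statement) =====
-- stated objective: simpler
-- what changed: Replaced the tee/zip triwise iterator plus for-else and two try/except IndexError tail appends with one uniform index loop per sentence that renders every word (capitalizing only when i+2 < n) and a single ''.join at the end.
import Mathlib
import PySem

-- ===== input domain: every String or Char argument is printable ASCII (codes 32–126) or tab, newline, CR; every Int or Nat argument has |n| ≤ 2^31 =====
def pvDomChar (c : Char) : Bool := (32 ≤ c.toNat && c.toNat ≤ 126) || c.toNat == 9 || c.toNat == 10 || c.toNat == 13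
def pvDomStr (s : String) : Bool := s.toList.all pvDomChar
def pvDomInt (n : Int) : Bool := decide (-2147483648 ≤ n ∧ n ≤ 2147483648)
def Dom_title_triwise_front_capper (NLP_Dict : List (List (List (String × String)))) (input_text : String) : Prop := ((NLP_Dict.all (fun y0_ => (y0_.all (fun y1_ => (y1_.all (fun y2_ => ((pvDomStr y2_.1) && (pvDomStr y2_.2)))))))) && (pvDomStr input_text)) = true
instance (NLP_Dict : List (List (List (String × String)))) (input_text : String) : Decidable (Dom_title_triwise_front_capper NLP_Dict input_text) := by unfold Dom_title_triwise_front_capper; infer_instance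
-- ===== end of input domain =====

-- B replaces A's tee/zip triwise iterator plus for-else/try-except tail handling with one uniform
-- index loop per sentence and a single join (objective: simpler; same asymptotic cost).

-- ===== shared primitives (library calls both Pythons make) =====
-- word['k'] : first-match lookup in the association list (none = KeyError, excluded by Pre_)
def pvGetKey (w : List (String × String)) (k : String) : Option String :=
  (w.find? (fun p => p.1 == k)).map Prod.snd

-- int(word['k']) ; KeyError / ValueError are excluded by Pre_, so the default 0 is never observed
def pvIntAt (w : List (String × String)) (k : String) : Int :=
  ((pvGetKey w k).bind PySem.Int.ofStr?).getD 0

-- n*' '  (empty for n ≤ 0; exact Python semantics)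
def pvSpaces (n : Int) : String := String.ofList (List.replicate n.toNat ' ')

def pvTitles : List String := ["agent", "brother", "cantor", "captain", "chairperson", "chancellor", "chef", "chief", "commissioner", "darth", "dame", "dean", "deputy", "detective", "director", "doctor", "father", "governor", "judge", "king", "queen", "prince", "princess", "czar", "lady", "laird", "lieutenant", "lord", "madame", "master", "miss", "officer", "pastor", "president", "principal", "professor", "provost", "rabbi", "rector", "regent", "reverend", "saint", "sensei", "sheriff", "sister", "student", "trainer", "warden"]

-- str.title(): start of each alphabetic run uppercased, rest lowercased (exact on the ASCII domain)
def pvTitle (s : String) : String :=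
  String.ofList ((s.toList.foldl
    (fun (acc : List Char × Bool) c =>
      if c.isAlpha then ((if acc.2 then c.toLower else c.toUpper) :: acc.1, true)
      else (c :: acc.1, false)) ([], false)).1.reverse)

-- input_text[int(w['start_char']):int(w['end_char'])]
def pvLoc (text : String) (w : List (String × String)) : String :=
  PySem.Str.slice text (some (pvIntAt w "start_char")) (some (pvIntAt w "end_char"))

-- the three-part capitalization condition (identical in both Pythons)
def pvCond (w1 w2 w3 : List (String × String)) : Bool :=
  decide ((pvGetKey w1 "text").getD "" ∈ pvTitles) &&
  ((pvGetKey w2 "text").getD "" == "of") &&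
  decide ((pvGetKey w3 "upos").getD "" ∈ ["PROPN", "NOUN"])

-- ===== PORT A =====
-- triwise(iterable): zip of the sentence with its two shifted copies
def pvTriwise : List (List (String × String)) → List ((List (String × String)) × (List (String × String)) × (List (String × String)))
  | w1 :: w2 :: w3 :: t => (w1, w2, w3) :: pvTriwise (w2 :: w3 :: t)
  | _ => []

-- one iteration of A's loop body: what gets appended for the triple (word1, word2, word3)
def pvPieceA (text : String) (t : (List (String × String)) × (List (String × String)) × (List (String × String))) : String :=
  if pvCond t.1 t.2.1 t.2.2 then
    pvTitle (pvLoc text t.1) ++ pvSpaces (pvIntAt t.2.1 "start_char" - pvIntAt t.1 "end_char")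
  else
    pvLoc text t.1 ++ pvSpaces (pvIntAt t.2.1 "start_char" - pvIntAt t.1 "end_char")

-- the for-else tail: try sentence[-2] … except IndexError: continue; then sentence[-1] (cannot fail then)
def pvTailA (text : String) (s : List (List (String × String))) : String :=
  match PySem.List.pyGet? s (-2) with
  | none => ""  -- IndexError → continue
  | some wm2 =>
    let wm1 := (PySem.List.pyGet? s (-1)).getD []
    (pvLoc text wm2 ++ pvSpaces (pvIntAt wm1 "start_char" - pvIntAt wm2 "end_char"))
      ++ (pvLoc text wm1 ++ " ")

def title_triwise_front_capper (NLP_Dict : List (List (List (String × String)))) (input_text : String) : String :=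
  (NLP_Dict.foldl
    (fun acc s => ((pvTriwise s).foldl (fun a t => a ++ pvPieceA input_text t) acc) ++ pvTailA input_text s)
    "") ++ " "

-- ===== PORT B =====
-- Source B's _render(sentence, i, n, input_text)
def pvRender (text : String) (s : List (List (String × String))) (i n : Nat) : String :=
  let w := s.getD i []
  let loc := pvLoc text w
  let loc2 := if i + 2 < n && pvCond w (s.getD (i + 1) []) (s.getD (i + 2) []) then pvTitle loc else loc
  if i + 1 < n then
    loc2 ++ pvSpaces (pvIntAt (s.getD (i + 1) []) "start_char" - pvIntAt w "end_char")
  else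
    loc2 ++ " "

-- ''.join(pieces)
def pvConcat (l : List String) : String := l.foldl (· ++ ·) ""

def title_triwise_front_capper_alt (NLP_Dict : List (List (List (String × String)))) (input_text : String) : String :=
  pvConcat (NLP_Dict.flatMap (fun s =>
    if s.length < 2 then []  -- continue
    else (List.range s.length).map (fun i => pvRender input_text s i s.length))) ++ " "

-- ===== PRECONDITION & SPEC =====
def pvOkInt (w : List (String × String)) (k : String) : Bool := ((pvGetKey w k).bind PySem.Int.ofStr?).isSome
def pvHasKey (w : List (String × String)) (k : String) : Bool := (pvGetKey w k).isSome

-- Exactly the inputs on which Python A returns (no KeyError/ValueError): in every sentence of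
-- length ≥ 2 each word has int-parseable 'start_char'/'end_char', and along every consecutive
-- triple the 'text'/'upos' keys that A's short-circuit condition actually reads are present.
def Pre_title_triwise_front_capper (NLP_Dict : List (List (List (String × String)))) (input_text : String) : Prop :=
  ∀ s ∈ NLP_Dict, 2 ≤ s.length →
    (∀ w ∈ s, pvOkInt w "start_char" = true ∧ pvOkInt w "end_char" = true) ∧
    (∀ t ∈ s.zip (s.tail.zip s.tail.tail),
      pvHasKey t.1 "text" = true ∧
      ((pvGetKey t.1 "text").getD "" ∈ pvTitles →
        pvHasKey t.2.1 "text" = true ∧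
        ((pvGetKey t.2.1 "text").getD "" = "of" → pvHasKey t.2.2 "upos" = true)))

instance (NLP_Dict : List (List (List (String × String)))) (input_text : String) : Decidable (Pre_title_triwise_front_capper NLP_Dict input_text) := by unfold Pre_title_triwise_front_capper; infer_instance

def pvWitness_title_triwise_front_capper : (List (List (List (String × String)))) × String :=
  ([[[("text", "king"), ("upos", "NOUN"), ("start_char", "0"), ("end_char", "4")],
     [("text", "of"), ("upos", "ADP"), ("start_char", "5"), ("end_char", "7")],
     [("text", "France"), ("upos", "PROPN"), ("start_char", "8"), ("end_char", "14")]]],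
   "king of France")

def Spec_title_triwise_front_capper (NLP_Dict : List (List (List (String × String)))) (input_text : String) (out : String) : Prop := out = title_triwise_front_capper_alt NLP_Dict input_text
instance (NLP_Dict : List (List (List (String × String)))) (input_text : String) (out : String) : Decidable (Spec_title_triwise_front_capper NLP_Dict input_text out) := by unfold Spec_title_triwise_front_capper; infer_instance

-- ===== CLAIM (what is proved, stated in full; the proofs are below) =====
def Claim_equal_title_triwise_front_capper : Prop := ∀ (NLP_Dict : List (List (List (String × String)))) (input_text : String), Dom_title_triwise_front_capper NLP_Dict input_text → Pre_title_triwise_front_capper NLP_Dict input_text → Spec_title_triwise_front_capper NLP_Dict input_text (title_triwise_front_capper NLP_Dict input_text)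

-- ===== LEMMAS AND PROOFS =====

theorem pv_foldl_init (l : List String) : ∀ x : String, l.foldl (· ++ ·) x = x ++ pvConcat l := by
  induction l with
  | nil => intro x; simp [pvConcat]
  | cons a t ih =>
    intro x
    show t.foldl (· ++ ·) (x ++ a) = x ++ pvConcat (a :: t)
    have h2 : pvConcat (a :: t) = a ++ pvConcat t := by
      show t.foldl (· ++ ·) ("" ++ a) = a ++ pvConcat t
      rw [ih ("" ++ a), String.empty_append]
    rw [ih (x ++ a), h2, String.append_assoc]

theorem pvConcat_cons (a : String) (l : List String) : pvConcat (a :: l) = a ++ pvConcat l := by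
  show l.foldl (· ++ ·) ("" ++ a) = a ++ pvConcat l
  rw [pv_foldl_init, String.empty_append]

theorem pvConcat_append (l₁ l₂ : List String) : pvConcat (l₁ ++ l₂) = pvConcat l₁ ++ pvConcat l₂ := by
  show (l₁ ++ l₂).foldl (· ++ ·) "" = _
  rw [List.foldl_append, pv_foldl_init]
  rfl

theorem foldl_append_extract {α : Type} (f : α → String) (l : List α) (a : String) :
    l.foldl (fun acc x => acc ++ f x) a = a ++ pvConcat (l.map f) := by
  induction l generalizing a with
  | nil => simp [pvConcat]
  | cons x t ih =>
    simp only [List.foldl_cons, List.map_cons]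
    rw [ih, pvConcat_cons, String.append_assoc]

theorem pvConcat_flatMap {α : Type} (g : α → List String) (l : List α) :
    pvConcat (l.flatMap g) = pvConcat (l.map (fun x => pvConcat (g x))) := by
  induction l with
  | nil => rfl
  | cons x t ih =>
    simp only [List.flatMap_cons, List.map_cons]
    rw [pvConcat_append, pvConcat_cons, ih]

theorem pyGet?_cons_neg {α : Type} (w : α) (s : List α) (i : Int) (hk : i < 0) (h : -i ≤ s.length) :
    PySem.List.pyGet? (w :: s) i = PySem.List.pyGet? s i := by
  simp only [PySem.List.pyGet?, PySem.List.pyIdx?, List.length_cons]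
  have hneg : ¬ (0:Int) ≤ i := by omega
  rw [if_neg hneg, if_neg hneg,
    if_pos (show -((s.length + 1 : Nat) : Int) ≤ i by push_cast; omega),
    if_pos (show -((s.length : Nat) : Int) ≤ i by omega)]
  simp only [Option.bind]
  have hle : (-i).toNat ≤ s.length := by omega
  rw [show s.length + 1 - (-i).toNat = (s.length - (-i).toNat) + 1 by omega, List.getElem?_cons_succ]

-- canonical per-sentence rendering, used to relate the two ports
def pvHeadCond (w1 w2 : List (String × String)) (rest : List (List (String × String))) : Bool :=
  match rest with
  | w3 :: _ => pvCond w1 w2 w3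
  | [] => false

def pvCanon (text : String) : List (List (String × String)) → String
  | [] => ""
  | [w] => pvLoc text w ++ " "
  | w1 :: w2 :: rest =>
    ((if pvHeadCond w1 w2 rest then pvTitle (pvLoc text w1) else pvLoc text w1)
      ++ pvSpaces (pvIntAt w2 "start_char" - pvIntAt w1 "end_char")) ++ pvCanon text (w2 :: rest)

def pvEmitA (text : String) (s : List (List (String × String))) : String :=
  pvConcat ((pvTriwise s).map (pvPieceA text)) ++ pvTailA text s

theorem pvTailA_cons (text : String) (w : List (String × String)) (s : List (List (String × String)))
    (h : 2 ≤ s.length) : pvTailA text (w :: s) = pvTailA text s := by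
  unfold pvTailA
  rw [pyGet?_cons_neg w s (-2) (by norm_num) (by omega),
      pyGet?_cons_neg w s (-1) (by norm_num) (by omega)]

theorem pvEmitA_canon (text : String) (s : List (List (String × String))) :
    pvEmitA text s = if 2 ≤ s.length then pvCanon text s else "" := by
  induction s with
  | nil => rfl
  | cons w1 t ih =>
    cases t with
    | nil => rfl
    | cons w2 r =>
      cases r with
      | nil =>
        rw [if_pos (by simp)]
        have hTri : pvTriwise [w1, w2] = [] := rfl
        have hTail : pvTailA text [w1, w2] =
            (pvLoc text w1 ++ pvSpaces (pvIntAt w2 "start_char" - pvIntAt w1 "end_char"))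
              ++ (pvLoc text w2 ++ " ") := rfl
        show pvConcat ((pvTriwise [w1, w2]).map (pvPieceA text)) ++ pvTailA text [w1, w2] = _
        rw [hTri, hTail]
        show pvConcat [] ++ _ = _
        rw [show pvConcat [] = "" from rfl, String.empty_append]
        show _ = ((if pvHeadCond w1 w2 [] then pvTitle (pvLoc text w1) else pvLoc text w1)
          ++ pvSpaces (pvIntAt w2 "start_char" - pvIntAt w1 "end_char")) ++ pvCanon text [w2]
        rw [show pvHeadCond w1 w2 [] = false from rfl]
        rfl
      | cons w3 t' =>
        have h2 : 2 ≤ (w2 :: w3 :: t').length := by simp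
        have hstep : pvEmitA text (w1 :: w2 :: w3 :: t')
            = pvPieceA text (w1, w2, w3) ++ pvEmitA text (w2 :: w3 :: t') := by
          unfold pvEmitA
          rw [show pvTriwise (w1 :: w2 :: w3 :: t') = (w1, w2, w3) :: pvTriwise (w2 :: w3 :: t') from rfl,
              List.map_cons, pvConcat_cons, pvTailA_cons text w1 _ h2, String.append_assoc]
        rw [hstep, ih, if_pos h2, if_pos (by simp)]
        show _ = pvCanon text (w1 :: w2 :: w3 :: t')
        rw [show pvCanon text (w1 :: w2 :: w3 :: t')
            = ((if pvHeadCond w1 w2 (w3 :: t') then pvTitle (pvLoc text w1) else pvLoc text w1)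
              ++ pvSpaces (pvIntAt w2 "start_char" - pvIntAt w1 "end_char")) ++ pvCanon text (w2 :: w3 :: t') from rfl,
            show pvHeadCond w1 w2 (w3 :: t') = pvCond w1 w2 w3 from rfl]
        cases hc : pvCond w1 w2 w3 <;>
          simp [pvPieceA, hc, String.append_assoc]

theorem pvRender_shift (text : String) (w : List (String × String))
    (s : List (List (String × String))) (i n : Nat) :
    pvRender text (w :: s) (i + 1) (n + 1) = pvRender text s i n := by
  simp only [pvRender]
  rw [show i + 1 + 2 = (i + 2) + 1 by omega, show i + 1 + 1 = (i + 1) + 1 by omega]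
  simp only [List.getD_cons_succ, Nat.add_lt_add_iff_right]

theorem pvRender_zero (text : String) (w w2 : List (String × String))
    (r : List (List (String × String))) :
    pvRender text (w :: w2 :: r) 0 ((w2 :: r).length + 1)
      = (if pvHeadCond w w2 r then pvTitle (pvLoc text w) else pvLoc text w)
        ++ pvSpaces (pvIntAt w2 "start_char" - pvIntAt w "end_char") := by
  cases r with
  | nil => rfl
  | cons w3 r' =>
    rw [show pvHeadCond w w2 (w3 :: r') = pvCond w w2 w3 from rfl]
    simp only [pvRender, List.length_cons]
    have h2 : (0 + 2 < r'.length + 1 + 1 + 1) = True := eq_true (by omega)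
    have h1 : (0 + 1 < r'.length + 1 + 1 + 1) = True := eq_true (by omega)
    simp only [h2, h1, decide_true, Bool.true_and, if_true]
    rw [show (0 : Nat) + 2 = (0 + 1) + 1 from rfl]
    simp only [List.getD_cons_succ, List.getD_cons_zero]

theorem pvEmitB_canon (text : String) (s : List (List (String × String))) (h : 1 ≤ s.length) :
    pvConcat ((List.range s.length).map (fun i => pvRender text s i s.length)) = pvCanon text s := by
  induction s with
  | nil => simp at h
  | cons w t ih =>
    rw [show (w :: t).length = t.length + 1 from rfl, List.range_succ_eq_map, List.map_cons,
        List.map_map, pvConcat_cons]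
    have hshift : ((fun i => pvRender text (w :: t) i (t.length + 1)) ∘ Nat.succ)
        = fun i => pvRender text t i t.length := by
      funext i
      show pvRender text (w :: t) (i + 1) (t.length + 1) = pvRender text t i t.length
      exact pvRender_shift text w t i t.length
    rw [hshift]
    cases t with
    | nil =>
      show pvRender text [w] 0 1 ++ pvConcat (List.map _ (List.range 0)) = pvCanon text [w]
      rw [List.range_zero, List.map_nil, show pvConcat [] = "" from rfl, String.append_empty]
      rfl
    | cons w2 r =>
      rw [ih (by simp)]
      show pvRender text (w :: w2 :: r) 0 ((w2 :: r).length + 1) ++ _ = _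
      rw [pvRender_zero]
      rfl

theorem pvEmitA_eq_concat_emitB (text : String) (s : List (List (String × String))) :
    pvEmitA text s
      = pvConcat (if s.length < 2 then []
          else (List.range s.length).map (fun i => pvRender text s i s.length)) := by
  by_cases h2 : 2 ≤ s.length
  · rw [pvEmitA_canon, if_pos h2, if_neg (by omega), pvEmitB_canon text s (by omega)]
  · rw [pvEmitA_canon, if_neg h2, if_pos (by omega)]
    rfl

theorem ports_eq (NLP_Dict : List (List (List (String × String)))) (input_text : String) :
    title_triwise_front_capper NLP_Dict input_text = title_triwise_front_capper_alt NLP_Dict input_text := by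
  unfold title_triwise_front_capper title_triwise_front_capper_alt
  congr 1
  have hstep : (fun (acc : String) s =>
      ((pvTriwise s).foldl (fun a t => a ++ pvPieceA input_text t) acc) ++ pvTailA input_text s)
      = fun (acc : String) s => acc ++ pvEmitA input_text s := by
    funext acc s
    rw [foldl_append_extract, String.append_assoc]
    rfl
  rw [hstep, foldl_append_extract (f := pvEmitA input_text), String.empty_append, pvConcat_flatMap]
  congr 1
  apply List.map_congr_left
  intro s _
  exact pvEmitA_eq_concat_emitB input_text s

-- ===== VERDICT (by name: the statement is the Claim_ definition above) =====
theorem title_triwise_front_capper_spec : Claim_equal_title_triwise_front_capper := by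
  intro nlp text _ _
  unfold Spec_title_triwise_front_capper
  exact ports_eq nlp text
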